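-- pv_equiv track=rewrite | github.com/JosueHernandezR/Evolutionary_Computing | Tarea 4/GAMoneda.py | evaluar_fitness
-- ===== SOURCE A (Python) =====
-- cambio = 9
--
-- monedas = [5, 2, 1]
--
-- long_cromosomas = len(monedas)
--
-- def evaluar_fitness(cromosoma):
--     cambio_cromosoma = 0
--     fitness = 1
--     for i in range(long_cromosomas):
--         cambio_cromosoma += cromosoma[i]*monedas[i]
--
--         if cambio_cromosoma > cambio:
--             fitness = 0
--
--         if cambio_cromosoma <= cambio:
--             fitness = cambio_cromosoma
--
--     return (cambio_cromosoma, fitness)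
-- ===== SOURCE B (Python) =====
-- cambio = 9
--
-- monedas = [5, 2, 1]
--
-- long_cromosomas = len(monedas)
--
-- def evaluar_fitness(cromosoma):
--     # closed form: monedas is the fixed list [5, 2, 1], so the weighted sum
--     # needs no loop; indexing still raises IndexError on short inputs like A.
--     total = 5 * cromosoma[0] + 2 * cromosoma[1] + cromosoma[2]
--     return (total, total if total <= cambio else 0)
-- ===== Notes on version B (the rewrite author's own statement) =====
-- stated objective: simpler
-- what changed: B replaces A's loop with stateful in-loop fitness reassignment by a loop-free closed-form dot product against the fixed three-coin list and a single final branch for the fitness.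
import Mathlib
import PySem

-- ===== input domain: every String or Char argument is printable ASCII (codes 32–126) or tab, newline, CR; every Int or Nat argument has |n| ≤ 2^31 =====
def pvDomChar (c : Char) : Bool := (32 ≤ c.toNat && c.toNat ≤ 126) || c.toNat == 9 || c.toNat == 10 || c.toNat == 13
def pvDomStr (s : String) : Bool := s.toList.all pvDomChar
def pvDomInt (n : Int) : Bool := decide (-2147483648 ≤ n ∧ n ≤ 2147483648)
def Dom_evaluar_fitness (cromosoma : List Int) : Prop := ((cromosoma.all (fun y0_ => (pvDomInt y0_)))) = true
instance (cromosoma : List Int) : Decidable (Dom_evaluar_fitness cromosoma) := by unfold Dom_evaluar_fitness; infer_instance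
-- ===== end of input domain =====

-- B replaces A's loop (with dead in-loop fitness reassignments) by a loop-free closed-form
-- dot product against the fixed three-coin list plus one final branch; objective: simpler.

def cambio : Int := 9

def monedas : List Int := [5, 2, 1]

-- ===== PORT A =====
-- state (cambio_cromosoma, fitness); indexing via pyGetD (always in range under Pre_)
def evaluar_fitness (cromosoma : List Int) : Int × Int :=
  (PySem.List.pyRange 0 3 1).foldl
    (fun (st : Int × Int) i =>
      let c := st.1 + (PySem.List.pyGetD cromosoma i 0) * (PySem.List.pyGetD monedas i 0)
      let f := if c > cambio then (0 : Int) else st.2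
      let f := if c ≤ cambio then c else f
      (c, f))
    (0, 1)

-- ===== PORT B =====
-- closed form, no loop; indexing in range under Pre_
def evaluar_fitness_alt (cromosoma : List Int) : Int × Int :=
  let total := 5 * (PySem.List.pyGetD cromosoma 0 0)
             + 2 * (PySem.List.pyGetD cromosoma 1 0)
             + (PySem.List.pyGetD cromosoma 2 0)
  (total, if total ≤ cambio then total else 0)

-- ===== PRECONDITION & SPEC =====
-- Pre_ excludes lists with fewer than 3 elements, on which Python A raises IndexError (B raises too).
def Pre_evaluar_fitness (cromosoma : List Int) : Prop := 3 ≤ cromosoma.length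
instance (cromosoma : List Int) : Decidable (Pre_evaluar_fitness cromosoma) := by unfold Pre_evaluar_fitness; infer_instance
def pvWitness_evaluar_fitness : List Int := [1, 2, 0]

def Spec_evaluar_fitness (cromosoma : List Int) (out : Int × Int) : Prop := out = evaluar_fitness_alt cromosoma
instance (cromosoma : List Int) (out : Int × Int) : Decidable (Spec_evaluar_fitness cromosoma out) := by unfold Spec_evaluar_fitness; infer_instance

-- ===== CLAIM (what is proved, stated in full; the proofs are below) =====
def Claim_equal_evaluar_fitness : Prop := ∀ (cromosoma : List Int), Dom_evaluar_fitness cromosoma → Pre_evaluar_fitness cromosoma → Spec_evaluar_fitness cromosoma (evaluar_fitness cromosoma)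

-- ===== LEMMAS AND PROOFS =====

-- ===== VERDICT (by name: the statement is the Claim_ definition above) =====
theorem evaluar_fitness_spec : Claim_equal_evaluar_fitness := by
  intro xs _ _
  unfold Spec_evaluar_fitness evaluar_fitness evaluar_fitness_alt
  rw [show PySem.List.pyRange 0 3 1 = [0, 1, 2] from by decide]
  simp only [List.foldl_cons, List.foldl_nil, monedas, cambio]
  rw [show PySem.List.pyGetD ([5,2,1]:List Int) 0 0 = 5 from by decide,
      show PySem.List.pyGetD ([5,2,1]:List Int) 1 0 = 2 from by decide,
      show PySem.List.pyGetD ([5,2,1]:List Int) 2 0 = 1 from by decide]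
  split_ifs <;> simp only [Prod.mk.injEq] <;> refine ⟨by omega, ?_⟩ <;> first | omega | trivial
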